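-- pv_equiv track=rewrite | github.com/gbechtold/Velocitytree | velocitytree/git_manager.py | _determine_change_type
-- ===== SOURCE A (Python) =====
-- from typing import Optional, List, Dict, Any, Tuple
--
-- def _determine_change_type(files: List[str],
--                           insertions: int, deletions: int) -> str:
--     """Determine the type of change based on files and metrics."""
--     # Simple heuristics for now
--     if any('test' in f.lower() for f in files):
--         return "test"
--     elif any('doc' in f.lower() or 'readme' in f.lower() for f in files):
--         return "docs"
--     elif insertions > deletions * 2:
--         return "feature"
--     elif deletions > insertions * 2:
--         return "remove"
--     elif any('fix' in f.lower() for f in files):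
--         return "fix"
--     else:
--         return "update"
-- ===== SOURCE B (Python) =====
-- def _determine_change_type(files, insertions, deletions):
--     """Determine the type of change based on files and metrics."""
--     labels = ("test", "docs", "feature", "remove", "fix", "update")
--
--     def rank(f):
--         name = f.lower()
--         if 'test' in name:
--             return 0
--         if 'doc' in name or 'readme' in name:
--             return 1
--         if 'fix' in name:
--             return 4
--         return 5
--
--     file_rank = min((rank(f) for f in files), default=5)
--     if insertions > deletions * 2:
--         metric_rank = 2
--     elif deletions > insertions * 2:
--         metric_rank = 3
--     else:
--         metric_rank = 5
--     return labels[min(file_rank, metric_rank)]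
-- ===== Notes on version B (the rewrite author's own statement) =====
-- stated objective: alternative
-- what changed: B replaces A's chain of separate any() scans and branches with a priority-rank computation: each file is mapped once to a numeric rank, the minimum file rank is combined with a metric rank, and the answer is a table lookup labels[min(...)] — correct because A's first-true branch equals the minimum-index true condition and the conditions are mutually independent.
import Mathlib
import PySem

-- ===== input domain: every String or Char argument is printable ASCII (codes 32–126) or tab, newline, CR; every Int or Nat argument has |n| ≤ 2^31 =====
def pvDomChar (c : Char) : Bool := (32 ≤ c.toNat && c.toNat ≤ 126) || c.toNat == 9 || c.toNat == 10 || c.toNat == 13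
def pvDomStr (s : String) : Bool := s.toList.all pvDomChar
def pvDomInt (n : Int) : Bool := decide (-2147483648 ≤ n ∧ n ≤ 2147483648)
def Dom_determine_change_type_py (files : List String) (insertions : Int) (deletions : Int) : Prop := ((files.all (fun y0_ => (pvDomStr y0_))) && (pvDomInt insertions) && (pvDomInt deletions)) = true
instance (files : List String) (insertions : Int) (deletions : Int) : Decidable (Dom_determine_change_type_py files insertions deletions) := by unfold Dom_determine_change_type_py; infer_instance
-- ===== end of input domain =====

-- B replaces A's branch chain of separate any() scans with a priority-rank algorithm:
-- each file is mapped once to a numeric rank, the minimum is combined with a metric rank,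
-- and the answer is a table lookup (alternative algorithm, same cost).


-- ===== PORT A =====
def determine_change_type_py (files : List String) (insertions : Int) (deletions : Int) : String :=
  if files.any (fun f => PySem.Str.isIn "test" (PySem.Str.lower f)) then "test"
  else if files.any (fun f => PySem.Str.isIn "doc" (PySem.Str.lower f) || PySem.Str.isIn "readme" (PySem.Str.lower f)) then "docs"
  else if insertions > deletions * 2 then "feature"
  else if deletions > insertions * 2 then "remove"
  else if files.any (fun f => PySem.Str.isIn "fix" (PySem.Str.lower f)) then "fix"
  else "update"

-- ===== PORT B =====
-- B: priority-rank algorithm — map each file once to a numeric rank, take the minimum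
-- (default 5 on empty), combine with a metric rank, index a label table.
def dct_labels : List String := ["test", "docs", "feature", "remove", "fix", "update"]

def dct_rank (f : String) : Nat :=
  if PySem.Str.isIn "test" (PySem.Str.lower f) then 0
  else if PySem.Str.isIn "doc" (PySem.Str.lower f) || PySem.Str.isIn "readme" (PySem.Str.lower f) then 1
  else if PySem.Str.isIn "fix" (PySem.Str.lower f) then 4
  else 5

def determine_change_type_py_alt (files : List String) (insertions : Int) (deletions : Int) : String :=
  let fileRank := (files.map dct_rank).foldl min 5    -- min(..., default=5); all ranks ≤ 5
  let metricRank : Nat :=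
    if insertions > deletions * 2 then 2
    else if deletions > insertions * 2 then 3
    else 5
  dct_labels.getD (min fileRank metricRank) "update"

-- ===== PRECONDITION & SPEC =====
def Spec_determine_change_type_py (files : List String) (insertions : Int) (deletions : Int) (out : String) : Prop := out = determine_change_type_py_alt files insertions deletions
instance (files : List String) (insertions : Int) (deletions : Int) (out : String) : Decidable (Spec_determine_change_type_py files insertions deletions out) := by unfold Spec_determine_change_type_py; infer_instance

-- ===== CLAIM (what is proved, stated in full; the proofs are below) =====
def Claim_equal_determine_change_type_py : Prop := ∀ (files : List String) (insertions : Int) (deletions : Int), Dom_determine_change_type_py files insertions deletions → Spec_determine_change_type_py files insertions deletions (determine_change_type_py files insertions deletions)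

-- ===== LEMMAS AND PROOFS =====

-- pure-Bool/Nat shape of the cons step of the fold
theorem min_rank_step (a : Nat) (p q r s b1 b2 b3 : Bool) :
    min (min a (if p then 0 else if q || r then 1 else if s then 4 else 5))
        (if b1 then 0 else if b2 then 1 else if b3 then 4 else 5)
      = min a (if p || b1 then 0 else if q || r || b2 then 1 else if s || b3 then 4 else 5) := by
  cases p <;> cases q <;> cases r <;> cases s <;> cases b1 <;> cases b2 <;> cases b3 <;> simp

-- the folded minimum rank, characterised by the three any-scans of A
theorem foldl_min_rank (files : List String) (a : Nat) (ha : a ≤ 5) :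
    (files.map dct_rank).foldl min a =
      min a (if files.any (fun f => PySem.Str.isIn "test" (PySem.Str.lower f)) then 0
        else if files.any (fun f => PySem.Str.isIn "doc" (PySem.Str.lower f) || PySem.Str.isIn "readme" (PySem.Str.lower f)) then 1
        else if files.any (fun f => PySem.Str.isIn "fix" (PySem.Str.lower f)) then 4
        else 5) := by
  induction files generalizing a with
  | nil => simp; omega
  | cons hd tl ih =>
    have h5 : dct_rank hd ≤ 5 := by unfold dct_rank; split_ifs <;> omega
    simp only [List.map_cons, List.foldl_cons, List.any_cons]
    rw [ih _ (le_trans (min_le_right a _) h5)]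
    unfold dct_rank
    exact min_rank_step a _ _ _ _ _ _ _

-- pure-Bool shape of the final decision: A's branch chain vs B's table lookup
theorem dct_final_step (i d : Int) (b1 b2 b3 : Bool) :
    (if b1 then "test" else if b2 then "docs"
     else if i > d * 2 then "feature" else if d > i * 2 then "remove"
     else if b3 then "fix" else "update")
      = dct_labels.getD
          (min (min 5 (if b1 then 0 else if b2 then 1 else if b3 then 4 else 5))
               (if i > d * 2 then 2 else if d > i * 2 then 3 else 5)) "update" := by
  cases b1 <;> cases b2 <;> cases b3 <;> split_ifs <;> rfl

-- ===== VERDICT (by name: the statement is the Claim_ definition above) =====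
theorem determine_change_type_py_spec : Claim_equal_determine_change_type_py := by
  intro files insertions deletions _
  unfold Spec_determine_change_type_py determine_change_type_py determine_change_type_py_alt
  rw [foldl_min_rank files 5 (by omega)]
  exact dct_final_step insertions deletions _ _ _
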